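-- pv_equiv track=rewrite | github.com/pnnl/chemreasoner | src/evaluation/oc_evaluation.py | _find_max_location_bfs
-- ===== SOURCE A (Python) =====
-- def _find_max_location_bfs(given_list):
--     max_i = None
--     max_j = None
--     max_val = None
--     for i, sub_list in enumerate(given_list):
--         for j, elem in enumerate(sub_list):
--             if max_i is None:
--                 max_i = i
--                 max_j = j
--                 max_val = elem
--             if elem > max_val:
--                 max_i = i
--                 max_j = j
--                 max_val = elem
--     return max_i, max_j, max_val
-- ===== SOURCE B (Python) =====
-- def _find_max_location_bfs(given_list):
--     # Stage 1: one best (i, j, value) candidate per non-empty row.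
--     candidates = []
--     for i, row in enumerate(given_list):
--         if row:
--             best_j, best_v = 0, row[0]
--             for j, v in enumerate(row):
--                 if v > best_v:
--                     best_j, best_v = j, v
--             candidates.append((i, best_j, best_v))
--     # Stage 2: reduce the per-row candidates, keeping the earliest strict max.
--     best = None
--     for cand in candidates:
--         if best is None or cand[2] > best[2]:
--             best = cand
--     return (best[0], best[1], best[2]) if best is not None else (None, None, None)
-- ===== Notes on version B (the rewrite author's own statement) =====
-- stated objective: alternative
-- what changed: Replaces A's single nested scan carrying three Option cells with a two-stage reduction: first compute one (i, j, value) argmax candidate per non-empty row, then reduce across the per-row candidates with strict comparison.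
import Mathlib
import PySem

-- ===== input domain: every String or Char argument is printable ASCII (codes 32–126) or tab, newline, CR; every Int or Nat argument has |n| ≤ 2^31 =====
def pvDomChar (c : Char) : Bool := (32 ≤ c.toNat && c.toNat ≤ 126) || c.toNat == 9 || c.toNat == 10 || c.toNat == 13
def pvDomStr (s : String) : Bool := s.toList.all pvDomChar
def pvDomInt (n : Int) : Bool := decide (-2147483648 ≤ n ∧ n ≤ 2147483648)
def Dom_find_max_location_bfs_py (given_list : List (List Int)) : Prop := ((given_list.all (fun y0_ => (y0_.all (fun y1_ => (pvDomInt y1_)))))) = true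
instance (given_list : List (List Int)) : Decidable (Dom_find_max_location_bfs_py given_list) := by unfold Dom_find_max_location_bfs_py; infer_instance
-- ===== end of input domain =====

-- B changes the decomposition: per-row argmax candidates, then a reduction across rows (alternative structure, same cost).

-- ===== PORT A =====
-- inner body of A's nested loop: the two `if` statements over the (max_i, max_j, max_val) cells
def stepA (i : Int) (st : Option Int × Option Int × Option Int) (q : Int × Int) :
    Option Int × Option Int × Option Int :=
  let st1 := if st.1.isNone then (some i, some q.1, some q.2) else st
  match st1.2.2 with
  | some v => if q.2 > v then (some i, some q.1, some q.2) else st1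
  | none => st1

def find_max_location_bfs_py (given_list : List (List Int)) : Option Int × Option Int × Option Int :=
  (PySem.List.enumerate given_list).foldl
    (fun st p => (PySem.List.enumerate p.2).foldl (stepA p.1) st)
    (none, none, none)

-- ===== PORT B =====
-- `if v > best_v: best_j, best_v = j, v`
def rowBestStep (b : Int × Int) (q : Int × Int) : Int × Int :=
  if q.2 > b.2 then q else b

-- `if best is None or cand[2] > best[2]: best = cand`
def candStep (best : Option (Int × Int × Int)) (c : Int × Int × Int) : Option (Int × Int × Int) :=
  match best with
  | none => some c
  | some b => if c.2.2 > b.2.2 then some c else some b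

def find_max_location_bfs_py_alt (given_list : List (List Int)) : Option Int × Option Int × Option Int :=
  let candidates := (PySem.List.enumerate given_list).foldl
    (fun acc p =>
      match p.2 with
      | [] => acc
      | h :: _ =>
        let bj := (PySem.List.enumerate p.2).foldl rowBestStep (0, h)
        acc ++ [(p.1, bj.1, bj.2)])
    []
  match candidates.foldl candStep none with
  | none => (none, none, none)
  | some b => (some b.1, some b.2.1, some b.2.2)

-- ===== PRECONDITION & SPEC =====
def Spec_find_max_location_bfs_py (given_list : List (List Int)) (out : Option Int × Option Int × Option Int) : Prop := out = find_max_location_bfs_py_alt given_list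
instance (given_list : List (List Int)) (out : Option Int × Option Int × Option Int) : Decidable (Spec_find_max_location_bfs_py given_list out) := by unfold Spec_find_max_location_bfs_py; infer_instance

-- ===== CLAIM (what is proved, stated in full; the proofs are below) =====
def Claim_equal_find_max_location_bfs_py : Prop := ∀ (given_list : List (List Int)), Dom_find_max_location_bfs_py given_list → Spec_find_max_location_bfs_py given_list (find_max_location_bfs_py given_list)

-- ===== LEMMAS AND PROOFS =====

-- correspondence between A's three Option cells and an Option of a triple
def conv (o : Option (Int × Int × Int)) : Option Int × Option Int × Option Int :=
  match o with
  | none => (none, none, none)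
  | some b => (some b.1, some b.2.1, some b.2.2)

-- `opmerge o r`: adopt r over o only when strictly greater (left bias)
def opmerge (o r : Option (Int × Int × Int)) : Option (Int × Int × Int) :=
  match o, r with
  | o, none => o
  | none, r => r
  | some b, some c => if c.2.2 > b.2.2 then some c else some b

theorem stepA_conv (i : Int) (o : Option (Int × Int × Int)) (q : Int × Int) :
    stepA i (conv o) q = conv (candStep o (i, q.1, q.2)) := by
  cases o with
  | none => simp [stepA, conv, candStep]
  | some b =>
    simp only [stepA, conv, candStep, Option.isNone_some, Bool.false_eq_true, if_false]
    split_ifs <;> rfl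

theorem foldl_stepA_conv (i : Int) (l : List (Int × Int)) (o : Option (Int × Int × Int)) :
    l.foldl (stepA i) (conv o) = conv (l.foldl (fun o q => candStep o (i, q.1, q.2)) o) := by
  induction l generalizing o with
  | nil => rfl
  | cons q l ih => rw [List.foldl_cons, List.foldl_cons, stepA_conv, ih]

theorem opmerge_assoc (o : Option (Int × Int × Int)) (c : Int × Int × Int)
    (r : Option (Int × Int × Int)) :
    opmerge (candStep o c) r = opmerge o (opmerge (some c) r) := by
  have hnl : ∀ r : Option (Int × Int × Int), opmerge none r = r := fun r => by cases r <;> rfl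
  cases o with
  | none => rw [hnl]; rfl
  | some b =>
    cases r with
    | none => rfl
    | some m =>
      by_cases h1 : c.2.2 > b.2.2 <;> by_cases h2 : m.2.2 > c.2.2 <;> by_cases h3 : m.2.2 > b.2.2 <;>
        first
        | (exfalso; omega)
        | simp [candStep, opmerge, h1, h2, h3]

theorem foldl_candStep_opmerge (l : List (Int × Int × Int)) (o : Option (Int × Int × Int)) :
    l.foldl candStep o = opmerge o (l.foldl candStep none) := by
  induction l generalizing o with
  | nil => cases o <;> rfl
  | cons c l ih =>
    rw [List.foldl_cons, ih (candStep o c), opmerge_assoc]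
    rw [List.foldl_cons, ih (candStep none c)]
    rfl

-- A's inner fold from a some-state matches B's per-row best fold (indices are opaque data)
theorem inner_some (i : Int) (l : List (Int × Int)) (bj bv : Int) :
    l.foldl (fun o q => candStep o (i, q.1, q.2)) (some (i, bj, bv)) =
      some (i, l.foldl rowBestStep (bj, bv)) := by
  induction l generalizing bj bv with
  | nil => rfl
  | cons q l ih =>
    rw [List.foldl_cons, List.foldl_cons]
    have h1 : candStep (some (i, bj, bv)) (i, q.1, q.2) = some (i, rowBestStep (bj, bv) q) := by
      simp only [candStep, rowBestStep]
      split_ifs <;> rfl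
    rw [h1]
    exact ih (rowBestStep (bj, bv) q).1 (rowBestStep (bj, bv) q).2

-- folding A's merge over a non-empty row's candidates yields that row's best
theorem inner_none (i : Int) (row : List Int) (h : Int) :
    (PySem.List.enumerate (h :: row)).foldl (fun o q => candStep o (i, q.1, q.2)) none =
      some (i, (PySem.List.enumerate (h :: row)).foldl rowBestStep (0, h)) := by
  rw [PySem.List.enumerate_cons]
  rw [List.foldl_cons, List.foldl_cons]
  have h1 : candStep none (i, (0 : Int), h) = some (i, (0 : Int), h) := rfl
  have h2 : rowBestStep (0, h) (0, h) = ((0 : Int), h) := by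
    simp only [rowBestStep]; rw [if_neg (by omega)]
  rw [h1, h2]
  exact inner_some i _ 0 h

-- row step for A = merge with the row candidate
def rowMerge (o : Option (Int × Int × Int)) (p : Int × List Int) : Option (Int × Int × Int) :=
  match p.2 with
  | [] => o
  | h :: _ => candStep o (p.1, (PySem.List.enumerate p.2).foldl rowBestStep (0, h))

theorem outer_fold (rows : List (Int × List Int)) (o : Option (Int × Int × Int)) :
    rows.foldl (fun st p => (PySem.List.enumerate p.2).foldl (stepA p.1) st) (conv o) =
      conv (rows.foldl rowMerge o) := by
  induction rows generalizing o with
  | nil => rfl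
  | cons p rows ih =>
    rw [List.foldl_cons, List.foldl_cons]
    have hstep : (PySem.List.enumerate p.2).foldl (stepA p.1) (conv o) = conv (rowMerge o p) := by
      rw [foldl_stepA_conv]
      cases hrow : p.2 with
      | nil => simp [rowMerge, hrow, PySem.List.enumerate]
      | cons h t =>
        have hm : ∀ o', (PySem.List.enumerate (h :: t)).foldl
              (fun o q => candStep o (p.1, q.1, q.2)) o' =
            ((PySem.List.enumerate (h :: t)).map (fun q => (p.1, q.1, q.2))).foldl candStep o' :=
          fun o' => by rw [List.foldl_map]
        rw [hm o, foldl_candStep_opmerge, ← hm none, inner_none p.1 t h]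
        simp only [rowMerge, hrow]
        cases o <;> rfl
    rw [hstep, ih]

-- B's candidate-list build then reduce equals folding rowMerge directly
theorem build_reduce (rows : List (Int × List Int)) (acc : List (Int × Int × Int)) :
    ((rows.foldl (fun acc p =>
        match p.2 with
        | [] => acc
        | h :: _ =>
          let bj := (PySem.List.enumerate p.2).foldl rowBestStep (0, h)
          acc ++ [(p.1, bj.1, bj.2)]) acc).foldl candStep none) =
      rows.foldl rowMerge (acc.foldl candStep none) := by
  induction rows generalizing acc with
  | nil => rfl
  | cons p rows ih =>
    rw [List.foldl_cons, List.foldl_cons]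
    cases hrow : p.2 with
    | nil => rw [ih]; simp [rowMerge, hrow]
    | cons h t =>
      rw [ih, List.foldl_append]
      simp only [rowMerge, hrow, List.foldl_cons, List.foldl_nil]

-- ===== VERDICT (by name: the statement is the Claim_ definition above) =====
theorem find_max_location_bfs_py_spec : Claim_equal_find_max_location_bfs_py := by
  intro given_list _
  show find_max_location_bfs_py given_list = find_max_location_bfs_py_alt given_list
  have h1 := outer_fold (PySem.List.enumerate given_list) none
  have h2 := build_reduce (PySem.List.enumerate given_list) []
  simp only [List.foldl_nil] at h2
  show (PySem.List.enumerate given_list).foldl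
      (fun st p => (PySem.List.enumerate p.2).foldl (stepA p.1) st) (conv none) =
    (match ((PySem.List.enumerate given_list).foldl
        (fun acc p =>
          match p.2 with
          | [] => acc
          | h :: _ =>
            let bj := (PySem.List.enumerate p.2).foldl rowBestStep (0, h)
            acc ++ [(p.1, bj.1, bj.2)]) []).foldl candStep none with
      | none => ((none : Option Int), (none : Option Int), (none : Option Int))
      | some b => (some b.1, some b.2.1, some b.2.2))
  rw [h1, h2]
  cases (PySem.List.enumerate given_list).foldl rowMerge none <;> rfl
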